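-- pv_equiv track=rewrite | github.com/AliceMagretta/A-Framework-for-attacks-on-Privacy-preservering-Record-Linkage | Code/libs/attacks/patternmining_attack.py | gen_freq_q_gram_bit_post_dict
-- ===== SOURCE A (Python) =====
-- def gen_freq_q_gram_bit_post_dict(q_gram_pos_assign_dict,
--                                   true_q_gram_pos_map_dict):
--     """Generate two dictionaries which for each identified frequent q-gram
--      contain its bit positions (either all or only the correct ones) based on
--      the given dictionary of positions and q-grams assigned to them.
--
--      Returns two dictionaries, the first containing all bit positions per
--      q-gram while the second only contains correct bit positions (based on the
--      given 'true_q_gram_pos_map_dict').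
--   """
--
--     all_identified_q_gram_pos_dict = {}  # Keys are q-grams, values sets of pos.
--     corr_identified_q_gram_pos_dict = {}  # Only correct positions
--     num_pos_removed = 0  # For the corrected dictionary
--
--     for (pos, pos_q_gram_set) in q_gram_pos_assign_dict.items():
--
--         for q_gram in pos_q_gram_set:
--
--             # Check if this is a correct position for this q-gram
--             #
--             if q_gram in true_q_gram_pos_map_dict.get(pos, set()):
--                 correct_pos = True
--             else:
--                 correct_pos = False
--
--             q_gram_pos_set = all_identified_q_gram_pos_dict.get(q_gram, set())
--             q_gram_pos_set.add(pos)
--             all_identified_q_gram_pos_dict[q_gram] = q_gram_pos_set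
--
--             if (correct_pos == True):
--                 q_gram_pos_set = corr_identified_q_gram_pos_dict.get(q_gram, set())
--                 q_gram_pos_set.add(pos)
--                 corr_identified_q_gram_pos_dict[q_gram] = q_gram_pos_set
--             else:
--                 num_pos_removed += 1
--
--     # Check each q-gram has at least one position in the correct only dictionary
--     #
--     for q_gram in corr_identified_q_gram_pos_dict.keys():
--         if (len(corr_identified_q_gram_pos_dict[q_gram]) == 0):
--             del corr_identified_q_gram_pos_dict[q_gram]
--
--     return all_identified_q_gram_pos_dict, corr_identified_q_gram_pos_dict
-- ===== SOURCE B (Python) =====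
-- def gen_freq_q_gram_bit_post_dict(q_gram_pos_assign_dict,
--                                   true_q_gram_pos_map_dict):
--     """Flatten-then-group re-implementation: build the list of
--     (q_gram, pos, is_correct) triples once, then group it twice."""
--
--     triples = []
--     for (pos, pos_q_gram_set) in q_gram_pos_assign_dict.items():
--         true_set = true_q_gram_pos_map_dict.get(pos, set())
--         for q_gram in pos_q_gram_set:
--             triples.append((q_gram, pos, q_gram in true_set))
--
--     all_identified_q_gram_pos_dict = {}
--     for (q_gram, pos, _) in triples:
--         all_identified_q_gram_pos_dict.setdefault(q_gram, set()).add(pos)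
--
--     corr_identified_q_gram_pos_dict = {}
--     for (q_gram, pos, correct_pos) in triples:
--         if correct_pos:
--             corr_identified_q_gram_pos_dict.setdefault(q_gram, set()).add(pos)
--
--     return all_identified_q_gram_pos_dict, corr_identified_q_gram_pos_dict
-- ===== Notes on version B (the rewrite author's own statement) =====
-- stated objective: alternative
-- what changed: Instead of one nested loop that interleaves updates to both dicts plus a dead counter and a dead cleanup pass, B flattens the input into a list of (q_gram, pos, is_correct) triples once and then builds each of the two dicts by its own independent grouping pass (setdefault), dropping the unused counter and the never-firing empty-set cleanup loop.
import Mathlib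
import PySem

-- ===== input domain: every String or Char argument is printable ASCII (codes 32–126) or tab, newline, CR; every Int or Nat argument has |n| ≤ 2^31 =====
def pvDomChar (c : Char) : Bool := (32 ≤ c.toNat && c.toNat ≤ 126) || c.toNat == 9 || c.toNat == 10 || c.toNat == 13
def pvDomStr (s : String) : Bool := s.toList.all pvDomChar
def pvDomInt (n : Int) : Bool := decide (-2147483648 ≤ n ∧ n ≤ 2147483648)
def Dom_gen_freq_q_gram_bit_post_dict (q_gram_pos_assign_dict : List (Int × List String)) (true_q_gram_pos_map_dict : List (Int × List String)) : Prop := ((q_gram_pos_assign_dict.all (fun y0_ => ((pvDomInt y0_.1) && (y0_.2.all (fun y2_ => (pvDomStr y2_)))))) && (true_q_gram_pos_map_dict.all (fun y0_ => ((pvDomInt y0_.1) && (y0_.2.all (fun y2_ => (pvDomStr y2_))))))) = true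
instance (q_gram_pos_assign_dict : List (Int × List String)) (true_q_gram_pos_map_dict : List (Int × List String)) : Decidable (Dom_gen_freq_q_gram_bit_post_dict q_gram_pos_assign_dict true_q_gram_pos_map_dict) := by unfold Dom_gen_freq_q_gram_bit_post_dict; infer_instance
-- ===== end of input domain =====

-- B replaces A's interleaved nested loop (two dicts + dead counter + dead cleanup pass) by a
-- flatten-into-triples pass followed by two independent grouping passes; objective: alternative.


-- ===== PORT A =====
-- Literal port of A.  State: (all_identified_q_gram_pos_dict, corr_identified_q_gram_pos_dict,
-- num_pos_removed).  The final cleanup loop over corr's keys is ported as a fold (in Python it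
-- never actually deletes, so the delete-while-iterating issue never arises).
def gen_freq_q_gram_bit_post_dict (q_gram_pos_assign_dict : List (Int × List String)) (true_q_gram_pos_map_dict : List (Int × List String)) : (List (String × List Int)) × (List (String × List Int)) :=
  let trueD : PySem.Dict Int (List String) := PySem.Dict.mk true_q_gram_pos_map_dict
  let st :=
    q_gram_pos_assign_dict.foldl
      (fun (st : PySem.Dict String (PySem.Set Int) × PySem.Dict String (PySem.Set Int) × Int) pp =>
        pp.2.foldl
          (fun st q_gram =>
            let correct_pos : Bool := (trueD.getD pp.1 []).contains q_gram
            let q_gram_pos_set := PySem.Set.add (st.1.getD q_gram []) pp.1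
            let allD := st.1.insert q_gram q_gram_pos_set
            if correct_pos then
              let q_gram_pos_set2 := PySem.Set.add (st.2.1.getD q_gram []) pp.1
              (allD, st.2.1.insert q_gram q_gram_pos_set2, st.2.2)
            else
              (allD, st.2.1, st.2.2 + 1))
          st)
      (PySem.Dict.empty, PySem.Dict.empty, (0 : Int))
  let corrD :=
    st.2.1.keys.foldl
      (fun d q_gram => if PySem.List.len (d.getD q_gram []) == 0 then d.erase q_gram else d)
      st.2.1
  (st.1.items, corrD.items)

-- ===== PORT B =====
-- Port of Source B: flatten to (q_gram, pos, is_correct) triples, then two grouping passes.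
def gen_freq_q_gram_bit_post_dict_alt (q_gram_pos_assign_dict : List (Int × List String)) (true_q_gram_pos_map_dict : List (Int × List String)) : (List (String × List Int)) × (List (String × List Int)) :=
  let trueD : PySem.Dict Int (List String) := PySem.Dict.mk true_q_gram_pos_map_dict
  let triples : List (String × Int × Bool) :=
    q_gram_pos_assign_dict.foldl
      (fun acc pp =>
        let true_set := trueD.getD pp.1 []
        pp.2.foldl (fun acc q_gram => acc ++ [(q_gram, pp.1, true_set.contains q_gram)]) acc)
      []
  let allD :=
    triples.foldl
      (fun d t => d.insert t.1 (PySem.Set.add (d.getD t.1 []) t.2.1))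
      (PySem.Dict.empty : PySem.Dict String (PySem.Set Int))
  let corrD :=
    triples.foldl
      (fun d t => if t.2.2 then d.insert t.1 (PySem.Set.add (d.getD t.1 []) t.2.1) else d)
      (PySem.Dict.empty : PySem.Dict String (PySem.Set Int))
  (allD.items, corrD.items)

-- ===== PRECONDITION & SPEC =====
def Spec_gen_freq_q_gram_bit_post_dict (q_gram_pos_assign_dict : List (Int × List String)) (true_q_gram_pos_map_dict : List (Int × List String)) (out : (List (String × List Int)) × (List (String × List Int))) : Prop := out = gen_freq_q_gram_bit_post_dict_alt q_gram_pos_assign_dict true_q_gram_pos_map_dict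
instance (q_gram_pos_assign_dict : List (Int × List String)) (true_q_gram_pos_map_dict : List (Int × List String)) (out : (List (String × List Int)) × (List (String × List Int))) : Decidable (Spec_gen_freq_q_gram_bit_post_dict q_gram_pos_assign_dict true_q_gram_pos_map_dict out) := by unfold Spec_gen_freq_q_gram_bit_post_dict; infer_instance

-- ===== CLAIM (what is proved, stated in full; the proofs are below) =====
def Claim_equal_gen_freq_q_gram_bit_post_dict : Prop := ∀ (q_gram_pos_assign_dict : List (Int × List String)) (true_q_gram_pos_map_dict : List (Int × List String)), Dom_gen_freq_q_gram_bit_post_dict q_gram_pos_assign_dict true_q_gram_pos_map_dict → Spec_gen_freq_q_gram_bit_post_dict q_gram_pos_assign_dict true_q_gram_pos_map_dict (gen_freq_q_gram_bit_post_dict q_gram_pos_assign_dict true_q_gram_pos_map_dict)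

-- ===== LEMMAS AND PROOFS =====

-- B's two grouping steps and A's dead counter step, named for the proofs.
def pvStepAll (d : PySem.Dict String (PySem.Set Int)) (t : String × Int × Bool) : PySem.Dict String (PySem.Set Int) :=
  d.insert t.1 (PySem.Set.add (d.getD t.1 []) t.2.1)

def pvStepCorr (d : PySem.Dict String (PySem.Set Int)) (t : String × Int × Bool) : PySem.Dict String (PySem.Set Int) :=
  if t.2.2 then d.insert t.1 (PySem.Set.add (d.getD t.1 []) t.2.1) else d

def pvStepCnt (n : Int) (t : String × Int × Bool) : Int :=
  if t.2.2 then n else n + 1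

-- Set.add never yields the empty list.
theorem pvSet_add_ne_nil (s : PySem.Set Int) (x : Int) : PySem.Set.add s x ≠ [] := by
  unfold PySem.Set.add
  split
  · intro h; subst h; simp [PySem.Set.contains] at *
  · simp

-- A's nested loop, run from any state, is the fold of the componentwise triple step over the
-- flattened triple list.
theorem pvA_loop_eq_triples (trueD : PySem.Dict Int (List String))
    (assign : List (Int × List String))
    (st : PySem.Dict String (PySem.Set Int) × PySem.Dict String (PySem.Set Int) × Int) :
    assign.foldl
      (fun st pp =>
        pp.2.foldl
          (fun st q_gram =>
            let correct_pos : Bool := (trueD.getD pp.1 []).contains q_gram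
            let q_gram_pos_set := PySem.Set.add (st.1.getD q_gram []) pp.1
            let allD := st.1.insert q_gram q_gram_pos_set
            if correct_pos then
              let q_gram_pos_set2 := PySem.Set.add (st.2.1.getD q_gram []) pp.1
              (allD, st.2.1.insert q_gram q_gram_pos_set2, st.2.2)
            else
              (allD, st.2.1, st.2.2 + 1))
          st)
      st
    =
    (assign.flatMap
      (fun pp => pp.2.map (fun q_gram => (q_gram, pp.1, (trueD.getD pp.1 []).contains q_gram)))).foldl
      (fun st t => (pvStepAll st.1 t, pvStepCorr st.2.1 t, pvStepCnt st.2.2 t)) st := by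
  induction assign generalizing st with
  | nil => rfl
  | cons pp rest ih =>
      simp only [List.foldl_cons, List.flatMap_cons, List.foldl_append, List.foldl_map]
      rw [ih]
      congr 1
      induction pp.2 generalizing st with
      | nil => rfl
      | cons q qs ih2 =>
          simp only [List.foldl_cons]
          rw [ih2]
          congr 1
          by_cases h : q ∈ trueD.getD pp.1 [] <;>
            simp [pvStepAll, pvStepCorr, pvStepCnt, h]

-- A fold over a componentwise triple step is the triple of the three independent folds.
theorem pvTriple_fold_split (ts : List (String × Int × Bool))
    (a b : PySem.Dict String (PySem.Set Int)) (n : Int) :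
    ts.foldl (fun st t => (pvStepAll st.1 t, pvStepCorr st.2.1 t, pvStepCnt st.2.2 t)) (a, b, n)
      = (ts.foldl pvStepAll a, ts.foldl pvStepCorr b, ts.foldl pvStepCnt n) := by
  induction ts generalizing a b n with
  | nil => rfl
  | cons t ts ih => simp only [List.foldl_cons]; exact ih _ _ _

-- Every value stored by the corr grouping pass is a nonempty list.
theorem pvCorr_values_ne_nil (ts : List (String × Int × Bool))
    (d : PySem.Dict String (PySem.Set Int))
    (hd : ∀ k v, d.get? k = some v → v ≠ []) :
    ∀ k v, (ts.foldl pvStepCorr d).get? k = some v → v ≠ [] := by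
  induction ts generalizing d with
  | nil => exact hd
  | cons t ts ih =>
      simp only [List.foldl_cons]
      apply ih
      intro k v hkv
      unfold pvStepCorr at hkv
      split at hkv
      · rw [PySem.Dict.get?_insert] at hkv
        split at hkv
        · cases hkv; exact pvSet_add_ne_nil _ _
        · exact hd _ _ hkv
      · exact hd _ _ hkv

-- The cleanup loop never erases anything when every stored value is nonempty.
theorem pvCleanup_id (d : PySem.Dict String (PySem.Set Int))
    (hd : ∀ k v, d.get? k = some v → v ≠ []) (ks : List String)
    (hks : ∀ k ∈ ks, k ∈ d.keys) :
    ks.foldl (fun d q => if PySem.List.len (d.getD q []) == 0 then d.erase q else d) d = d := by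
  induction ks with
  | nil => rfl
  | cons k ks ih =>
      have hk : k ∈ d.keys := hks k (by simp)
      have hc : d.contains k = true := (PySem.Dict.contains_iff_mem_keys d k).mpr hk
      have hsome : (d.get? k).isSome := by
        rw [PySem.Dict.contains_eq_isSome_get?] at hc; exact hc
      obtain ⟨v, hv⟩ := Option.isSome_iff_exists.mp hsome
      have hne : v ≠ [] := hd k v hv
      have hval : d.getD k [] = v := by
        rw [PySem.Dict.getD_eq_get?_getD, hv]; rfl
      have hlen : (PySem.List.len v == 0) = false := by
        simp [PySem.List.len, List.length_eq_zero_iff, hne]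
      simp only [List.foldl_cons, hval, hlen, Bool.false_eq_true, if_false]
      exact ih (fun j hj => hks j (by simp [hj]))

-- B's triple-building loop is the flatMap of the per-position triple lists.
theorem pvB_triples_eq (trueD : PySem.Dict Int (List String))
    (assign : List (Int × List String)) (acc : List (String × Int × Bool)) :
    assign.foldl
      (fun acc pp =>
        let true_set := trueD.getD pp.1 []
        pp.2.foldl (fun acc q_gram => acc ++ [(q_gram, pp.1, true_set.contains q_gram)]) acc)
      acc
    = acc ++ assign.flatMap
        (fun pp => pp.2.map (fun q_gram => (q_gram, pp.1, (trueD.getD pp.1 []).contains q_gram))) := by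
  induction assign generalizing acc with
  | nil => simp
  | cons pp rest ih =>
      simp only [List.foldl_cons, List.flatMap_cons]
      rw [ih, PySem.List.foldl_append_singleton_eq_map, List.append_assoc]

-- ===== VERDICT (by name: the statement is the Claim_ definition above) =====
theorem gen_freq_q_gram_bit_post_dict_spec : Claim_equal_gen_freq_q_gram_bit_post_dict := by
  intro assign trueMap _
  unfold Spec_gen_freq_q_gram_bit_post_dict
  unfold gen_freq_q_gram_bit_post_dict gen_freq_q_gram_bit_post_dict_alt
  simp only []
  rw [pvA_loop_eq_triples, pvTriple_fold_split]
  have hempty : ∀ k v, (PySem.Dict.empty : PySem.Dict String (PySem.Set Int)).get? k = some v → v ≠ [] := by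
    intro k v h; rw [PySem.Dict.get?_empty] at h; cases h
  rw [pvB_triples_eq, List.nil_append]
  set ts := assign.flatMap
      (fun pp => pp.2.map (fun q_gram => (q_gram, pp.1, ((PySem.Dict.mk trueMap).getD pp.1 []).contains q_gram))) with hts
  have hcorr := pvCorr_values_ne_nil ts PySem.Dict.empty hempty
  rw [pvCleanup_id (ts.foldl pvStepCorr PySem.Dict.empty) hcorr _ (fun k hk => hk)]
  rfl
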